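-- pv_equiv track=rewrite | github.com/silenciador9/PAR-Final-Project | DES.py | get_master_key_2
-- ===== SOURCE A (Python) =====
-- P10_prime = [7,3,1,5,2,10,4,9,8,6] # inverse P10
--
-- P8_prime = [2,4,6,1,3,5,8,7] # inverse P8
--
-- def right_shift(x):
--     lsd = x[len(x)-1]
--     new = lsd
--     for i in x[:len(x)-1]:
--         new = new + i
--     return new
--
-- def permute( dat, perm ) :
--     new_dat = ''
--     for i in perm:
--         new_dat += dat[i-1]
--     return new_dat
--
-- def get_master_key_2 ( SUB_KEY_2 ) :
--     pos_keys = []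
--
--     for i in ['0','1']: # first two digits are unknown
--         for j in ['0','1']: # first two digits unknown
--             pos_keys.append(i+j+permute(SUB_KEY_2, P8_prime))
--
--     for i in range(0,len(pos_keys)):
--         key = pos_keys[i]
--         L = right_shift(right_shift(key[:5]))  # we need to R shift twice for the second key
--         R = right_shift(right_shift(key[5:]))
--         key = L + R
--         pos_keys[i] = permute(key, P10_prime)
--
--     return pos_keys
-- ===== SOURCE B (Python) =====
-- # Single composite index table: folds P8-inverse, the double right-rotate of each
-- # 5-char half, and P10-inverse into one lookup over src = prefix + SUB_KEY_2.
-- _T = [8, 0, 5, 3, 7, 6, 1, 4, 2, 9]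
--
-- def get_master_key_2(SUB_KEY_2):
--     out = []
--     for prefix in ('00', '01', '10', '11'):
--         src = prefix + SUB_KEY_2
--         out.append(''.join(src[t] for t in _T))
--     return out
-- ===== Notes on version B (the rewrite author's own statement) =====
-- stated objective: simpler
-- what changed: Replaced the build loop, the double right_shift helper calls and the two permute passes by one precomputed composite index table applied in a single pass per prefix.
import Mathlib
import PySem

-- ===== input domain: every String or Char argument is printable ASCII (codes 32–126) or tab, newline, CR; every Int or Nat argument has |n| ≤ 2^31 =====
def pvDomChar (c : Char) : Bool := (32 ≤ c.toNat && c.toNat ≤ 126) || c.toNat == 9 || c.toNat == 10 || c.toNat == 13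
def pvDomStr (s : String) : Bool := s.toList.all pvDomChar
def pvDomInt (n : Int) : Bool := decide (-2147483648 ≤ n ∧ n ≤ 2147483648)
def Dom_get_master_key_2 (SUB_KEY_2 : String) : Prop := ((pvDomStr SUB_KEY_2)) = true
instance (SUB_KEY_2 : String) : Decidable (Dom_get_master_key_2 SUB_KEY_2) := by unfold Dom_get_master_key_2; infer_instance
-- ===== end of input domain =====

-- B folds A's three passes (P8⁻¹ permute, double right-rotate of each half, P10⁻¹ permute)
-- into one precomputed composite index table applied in a single pass per prefix (objective: simpler).
-- A raises IndexError when len(SUB_KEY_2) < 8; Pre_ excludes exactly those inputs.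

-- ===== PORT A =====
def pvP10Prime : List Int := [7,3,1,5,2,10,4,9,8,6]
def pvP8Prime : List Int := [2,4,6,1,3,5,8,7]

-- right_shift: lsd = x[len-1]; new = lsd; for i in x[:len-1]: new += i
-- (x[len-1] via pyGet?; none = IndexError, threaded as Option)
def pvRightShift (x : List Char) : Option (List Char) :=
  (PySem.List.pyGet? x ((x.length : Int) - 1)).map (fun lsd =>
    (PySem.List.slice x none (some ((x.length : Int) - 1))).foldl
      (fun new i => new ++ [i]) [lsd])

-- permute: new_dat = ''; for i in perm: new_dat += dat[i-1]
def pvPermute (dat : List Char) (perm : List Int) : Option (List Char) :=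
  perm.foldlM (fun new i => (PySem.List.pyGet? dat (i - 1)).map (fun c => new ++ [c])) []

-- body of get_master_key_2 with IndexError threaded as none
def pvGetMasterKey2Core (s : List Char) : Option (List (List Char)) := do
  -- first loop: for i in ['0','1']: for j in ['0','1']: pos_keys.append(i+j+permute(...))
  let pos_keys ← ['0','1'].foldlM (fun acc i =>
      ['0','1'].foldlM (fun acc j => do
        let p ← pvPermute s pvP8Prime
        pure (acc ++ [i :: j :: p])) acc) ([] : List (List Char))
  -- second loop: rewrite each entry in place
  pos_keys.mapM (fun key => do
    let L ← pvRightShift (PySem.List.slice key none (some 5)) >>= pvRightShift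
    let R ← pvRightShift (PySem.List.slice key (some 5) none) >>= pvRightShift
    pvPermute (L ++ R) pvP10Prime)

def get_master_key_2 (SUB_KEY_2 : String) : List String :=
  ((pvGetMasterKey2Core SUB_KEY_2.toList).map (·.map String.ofList)).getD []

-- ===== PORT B =====
def pvT : List Nat := [8, 0, 5, 3, 7, 6, 1, 4, 2, 9]

def get_master_key_2_alt (SUB_KEY_2 : String) : List String :=
  (["00", "01", "10", "11"].map (fun pfx =>
    let src := pfx.toList ++ SUB_KEY_2.toList
    String.ofList (pvT.map (fun t => src.getD t ' '))))

-- ===== PRECONDITION & SPEC =====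
-- A raises IndexError (dat[i-1] with i up to 8) when the sub-key has fewer than 8 characters.
def Pre_get_master_key_2 (SUB_KEY_2 : String) : Prop := 8 ≤ SUB_KEY_2.toList.length
instance (SUB_KEY_2 : String) : Decidable (Pre_get_master_key_2 SUB_KEY_2) := by unfold Pre_get_master_key_2; infer_instance
def pvWitness_get_master_key_2 : String := "01100101"

def Spec_get_master_key_2 (SUB_KEY_2 : String) (out : List String) : Prop := out = get_master_key_2_alt SUB_KEY_2
instance (SUB_KEY_2 : String) (out : List String) : Decidable (Spec_get_master_key_2 SUB_KEY_2 out) := by unfold Spec_get_master_key_2; infer_instance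

-- ===== CLAIM (what is proved, stated in full; the proofs are below) =====
def Claim_equal_get_master_key_2 : Prop := ∀ (SUB_KEY_2 : String), Dom_get_master_key_2 SUB_KEY_2 → Pre_get_master_key_2 SUB_KEY_2 → Spec_get_master_key_2 SUB_KEY_2 (get_master_key_2 SUB_KEY_2)

-- ===== LEMMAS AND PROOFS =====
theorem pv_exists_eight {l : List Char} (h : 8 ≤ l.length) :
    ∃ a b c d e f g k t, l = a :: b :: c :: d :: e :: f :: g :: k :: t := by
  match l with
  | a :: b :: c :: d :: e :: f :: g :: k :: t => exact ⟨a,b,c,d,e,f,g,k,t,rfl⟩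
  | [] | [_] | [_,_] | [_,_,_] | [_,_,_,_] | [_,_,_,_,_] | [_,_,_,_,_,_] | [_,_,_,_,_,_,_] =>
    simp at h

theorem pv_core_eq (a b c d e f g k : Char) (t : List Char) :
    get_master_key_2 (String.ofList (a :: b :: c :: d :: e :: f :: g :: k :: t))
      = get_master_key_2_alt (String.ofList (a :: b :: c :: d :: e :: f :: g :: k :: t)) := by
  simp [get_master_key_2, get_master_key_2_alt, pvGetMasterKey2Core, pvPermute, pvRightShift,
        pvP8Prime, pvP10Prime, pvT, PySem.List.pyGet?, PySem.List.pyIdx?, PySem.List.slice,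
        List.foldlM, List.mapM, List.mapM.loop, PySem.List.clampIdx, Option.bind, List.getD, String.toList_ofList,
        (show (0:Int) ≤ (t.length:Int) + 1 + 1 + 1 + 1 + 1 + 1 + 1 from by omega),
        (show (2:Int) ≤ (t.length:Int) + 1 + 1 + 1 + 1 + 1 + 1 + 1 + 1 from by omega),
        (show (3:Int) ≤ (t.length:Int) + 1 + 1 + 1 + 1 + 1 + 1 + 1 + 1 from by omega),
        (show (4:Int) ≤ (t.length:Int) + 1 + 1 + 1 + 1 + 1 + 1 + 1 + 1 from by omega),
        (show (5:Int) ≤ (t.length:Int) + 1 + 1 + 1 + 1 + 1 + 1 + 1 + 1 from by omega),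
        (show (6:Int) ≤ (t.length:Int) + 1 + 1 + 1 + 1 + 1 + 1 + 1 + 1 from by omega),
        (show (7:Int) ≤ (t.length:Int) + 1 + 1 + 1 + 1 + 1 + 1 + 1 + 1 from by omega),
        (show (8:Int) ≤ (t.length:Int) + 1 + 1 + 1 + 1 + 1 + 1 + 1 + 1 from by omega)]

-- ===== VERDICT (by name: the statement is the Claim_ definition above) =====
theorem get_master_key_2_spec : Claim_equal_get_master_key_2 := by
  intro S _ hPre
  obtain ⟨a,b,c,d,e,f,g,k,t,hl⟩ := pv_exists_eight hPre
  have hS : S = String.ofList (a :: b :: c :: d :: e :: f :: g :: k :: t) := by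
    rw [← hl]; simp
  unfold Spec_get_master_key_2
  rw [hS]
  exact pv_core_eq a b c d e f g k t
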